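-- pv_equiv track=rewrite | github.com/chenganqi498/leecode | generateParentheses.py | addOneParenthesis
-- ===== SOURCE A (Python) =====
-- def addOneParenthesis(old):
--     new = []
--     for i in range(len(old)-1):
--         if old[i] == '(' and old[i+1] == ')':
--             leftchild = old[0:i] + '()()' + old[i+2:]
--             rightchild = old[0:i] + '(())' + old[i+2:]
--             new.append(leftchild)
--             new.append(rightchild)
--     return new
-- ===== SOURCE B (Python) =====
-- def addOneParenthesis(old):
--     # Split on the (necessarily non-overlapping) '()' occurrences; each gap
--     # between adjacent parts is one match site.  Rebuild both variants per gap.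
--     parts = old.split('()')
--     new = []
--     for j in range(1, len(parts)):
--         left = '()'.join(parts[:j])
--         right = '()'.join(parts[j:])
--         new.append(left + '()()' + right)
--         new.append(left + '(())' + right)
--     return new
-- ===== Notes on version B (the rewrite author's own statement) =====
-- stated objective: faster
-- what changed: Instead of testing every index in a Python-level scan, B splits the string once on its (necessarily non-overlapping) '()' occurrences with str.split and rebuilds each variant from the parts with '()'.join, looping only over the matches.
import Mathlib
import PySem

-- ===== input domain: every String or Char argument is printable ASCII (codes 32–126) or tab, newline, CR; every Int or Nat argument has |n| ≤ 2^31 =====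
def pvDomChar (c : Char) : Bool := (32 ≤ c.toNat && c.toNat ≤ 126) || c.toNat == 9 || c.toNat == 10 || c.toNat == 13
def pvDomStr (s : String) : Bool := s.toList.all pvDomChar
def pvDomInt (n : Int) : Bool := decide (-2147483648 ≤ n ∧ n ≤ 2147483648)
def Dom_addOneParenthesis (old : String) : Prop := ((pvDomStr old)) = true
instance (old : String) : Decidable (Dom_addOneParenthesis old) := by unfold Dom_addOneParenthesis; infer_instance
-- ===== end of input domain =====

-- B replaces A's per-index scan by one str.split on the non-overlapping '()'
-- occurrences plus a '()'.join-based rebuild per match; objective: faster (constant factor).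

-- ===== PORT A =====
-- A: one loop over range(len(old)-1); string concatenation is ported on List Char
-- (exact: Python str + is list append on the character sequences); pyGetD's default
-- is never used since every index the loop reads is in range.
def addOneParenthesis (old : String) : List String :=
  let cs := old.toList
  (PySem.List.pyRange 0 ((cs.length : Int) - 1) 1).foldl
    (fun new i =>
      if PySem.List.pyGetD cs i ' ' = '(' ∧ PySem.List.pyGetD cs (i + 1) ' ' = ')' then
        let leftchild := String.ofList (PySem.List.slice cs (some 0) (some i) ++ "()()".toList
                                      ++ PySem.List.slice cs (some (i + 2)) none)
        let rightchild := String.ofList (PySem.List.slice cs (some 0) (some i) ++ "(())".toList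
                                      ++ PySem.List.slice cs (some (i + 2)) none)
        new ++ [leftchild, rightchild]
      else new) []

-- ===== PORT B =====
-- B: parts = old.split('()'); for j in 1..len(parts)-1 rebuild the two variants with '()'.join.
-- Ported on code-point lists: PySem.Chars.splitOn / join are exactly Python's str.split / str.join.
def addOneParenthesis_alt (old : String) : List String :=
  let parts := PySem.Chars.splitOn old.toList ['(', ')']
  (PySem.List.pyRange 1 (parts.length : Int) 1).flatMap (fun j =>
    let left := PySem.Chars.join ['(', ')'] (PySem.List.slice parts none (some j))
    let right := PySem.Chars.join ['(', ')'] (PySem.List.slice parts (some j) none)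
    [String.ofList (left ++ "()()".toList ++ right),
     String.ofList (left ++ "(())".toList ++ right)])

-- ===== PRECONDITION & SPEC =====
def Spec_addOneParenthesis (old : String) (out : List String) : Prop := out = addOneParenthesis_alt old
instance (old : String) (out : List String) : Decidable (Spec_addOneParenthesis old out) := by unfold Spec_addOneParenthesis; infer_instance

-- ===== CLAIM (what is proved, stated in full; the proofs are below) =====
def Claim_equal_addOneParenthesis : Prop := ∀ (old : String), Dom_addOneParenthesis old → Spec_addOneParenthesis old (addOneParenthesis old)

-- ===== LEMMAS AND PROOFS =====

def modHead {α : Type} (f : α → α) : List α → List α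
  | [] => []
  | h :: t => f h :: t

def mySplit : List Char → List (List Char)
  | [] => [[]]
  | [c] => [[c]]
  | a :: b :: rest =>
    if a = '(' ∧ b = ')' then [] :: mySplit rest
    else modHead (a :: ·) (mySplit (b :: rest))

def myA : List Char → List (List Char)
  | [] => []
  | [_] => []
  | a :: b :: rest =>
    if a = '(' ∧ b = ')' then
      ("()()".toList ++ rest) :: ("(())".toList ++ rest)
        :: (myA rest).map (['(', ')'] ++ ·)
    else (myA (b :: rest)).map (a :: ·)

theorem mySplit_ne_nil (cs : List Char) : mySplit cs ≠ [] := by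
  induction cs using mySplit.induct with
  | case1 => simp [mySplit]
  | case2 c => simp [mySplit]
  | case3 a b rest h ih => simp [mySplit, h]
  | case4 a b rest h ih =>
    rw [mySplit, if_neg h]
    cases hps : mySplit (b :: rest) with
    | nil => exact absurd hps ih
    | cons x t => simp [modHead]

theorem ic_cons_cons (x y : List Char) (zs : List (List Char)) :
    List.intercalate ['(', ')'] (x :: y :: zs)
      = x ++ ['(', ')'] ++ List.intercalate ['(', ')'] (y :: zs) := by
  simp [List.intercalate, List.append_assoc]

theorem ic_single (x : List Char) : List.intercalate ['(', ')'] [x] = x := by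
  simp [List.intercalate]

theorem ic_head_cons (c : Char) (x : List Char) (t : List (List Char)) :
    List.intercalate ['(', ')'] ((c :: x) :: t)
      = c :: List.intercalate ['(', ')'] (x :: t) := by
  cases t with
  | nil => simp [ic_single]
  | cons y t' => simp [ic_cons_cons]

theorem intercalate_mySplit (cs : List Char) :
    List.intercalate ['(', ')'] (mySplit cs) = cs := by
  induction cs using mySplit.induct with
  | case1 => simp [mySplit, ic_single]
  | case2 c => simp [mySplit, ic_single]
  | case3 a b rest h ih =>
    obtain ⟨rfl, rfl⟩ := h
    rw [show mySplit ('(' :: ')' :: rest) = [] :: mySplit rest from by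
      rw [mySplit, if_pos ⟨rfl, rfl⟩]]
    cases hps : mySplit rest with
    | nil => exact absurd hps (mySplit_ne_nil _)
    | cons x t =>
      rw [hps] at ih
      rw [ic_cons_cons]
      simpa using ih
  | case4 a b rest h ih =>
    rw [show mySplit (a :: b :: rest) = modHead (a :: ·) (mySplit (b :: rest)) from by
      rw [mySplit, if_neg h]]
    cases hps : mySplit (b :: rest) with
    | nil => exact absurd hps (mySplit_ne_nil _)
    | cons x t =>
      rw [hps] at ih
      simp only [modHead]
      rw [ic_head_cons, ih]

theorem go_spec (fuel : ℕ) : ∀ (l cur : List Char) (accs : List (List Char)),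
    l.length ≤ fuel →
    PySem.Chars.splitOn.go ['(', ')'] fuel l cur accs
      = accs.reverse ++ modHead (fun h => cur.reverse ++ h) (mySplit l) := by
  induction fuel using Nat.strong_induction_on with
  | _ fuel ih =>
    intro l cur accs hlen
    match fuel, l with
    | 0, l =>
      have hl : l = [] := List.eq_nil_of_length_eq_zero (Nat.le_zero.mp hlen)
      subst hl
      simp [PySem.Chars.splitOn.go, mySplit, modHead]
    | (f+1), [] =>
      simp [PySem.Chars.splitOn.go, mySplit, modHead]
    | (f+1), (c :: rest) =>
      rw [PySem.Chars.splitOn.go]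
      by_cases hp : List.isPrefixOf ['(', ')'] (c :: rest) = true
      · rw [if_pos hp]
        cases rest with
        | nil => simp [List.isPrefixOf] at hp
        | cons b rest2 =>
          simp only [List.isPrefixOf, Bool.and_eq_true, beq_iff_eq] at hp
          obtain ⟨h1, h2, -⟩ := hp
          subst h1; subst h2
          have hlen2 : rest2.length ≤ f := by simp at hlen; omega
          rw [show List.drop ['(', ')'].length ('(' :: ')' :: rest2) = rest2 from rfl]
          rw [ih f (by omega) rest2 [] (cur.reverse :: accs) hlen2]
          rw [show mySplit ('(' :: ')' :: rest2) = [] :: mySplit rest2 from by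
            rw [mySplit, if_pos ⟨rfl, rfl⟩]]
          cases hps : mySplit rest2 with
          | nil => exact absurd hps (mySplit_ne_nil _)
          | cons x t => simp [modHead]
      · rw [if_neg hp]
        have hlen2 : rest.length ≤ f := by simp at hlen; omega
        rw [ih f (by omega) rest (c :: cur) accs hlen2]
        cases rest with
        | nil => simp [mySplit, modHead]
        | cons b rest2 =>
          have hne : ¬(c = '(' ∧ b = ')') := by
            intro ⟨e1, e2⟩; subst e1; subst e2
            simp [List.isPrefixOf] at hp
          rw [show mySplit (c :: b :: rest2) = modHead (c :: ·) (mySplit (b :: rest2)) from by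
            rw [mySplit, if_neg hne]]
          cases hps : mySplit (b :: rest2) with
          | nil => exact absurd hps (mySplit_ne_nil _)
          | cons x t => simp [modHead]

theorem splitOn_eq_mySplit (cs : List Char) :
    PySem.Chars.splitOn cs ['(', ')'] = mySplit cs := by
  rw [PySem.Chars.splitOn, go_spec (cs.length + 1) cs [] [] (by omega)]
  cases hps : mySplit cs with
  | nil => exact absurd hps (mySplit_ne_nil _)
  | cons x t => simp [modHead]

theorem range_add_two (n : ℕ) :
    List.range (n + 2) = 0 :: 1 :: (List.range n).map (· + 2) := by
  rw [List.range_succ_eq_map, List.range_succ_eq_map, List.map_cons, List.map_map]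
  simp [Function.comp_def, Nat.add_comm]
  omega

def fA (cs : List Char) : List (List Char) :=
  (List.range (cs.length - 1)).flatMap (fun i =>
    if cs.getD i ' ' = '(' ∧ cs.getD (i + 1) ' ' = ')' then
      [cs.take i ++ "()()".toList ++ cs.drop (i + 2),
       cs.take i ++ "(())".toList ++ cs.drop (i + 2)]
    else [])

theorem A_eq_fA (old : String) :
    addOneParenthesis old = (fA old.toList).map String.ofList := by
  unfold addOneParenthesis fA
  set cs := old.toList with hcs
  rw [PySem.List.foldl_congr_mem _ _
      (fun new i => new ++
        (if PySem.List.pyGetD cs i ' ' = '(' ∧ PySem.List.pyGetD cs (i + 1) ' ' = ')' then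
          [String.ofList (PySem.List.slice cs (some 0) (some i) ++ "()()".toList
              ++ PySem.List.slice cs (some (i + 2)) none),
           String.ofList (PySem.List.slice cs (some 0) (some i) ++ "(())".toList
              ++ PySem.List.slice cs (some (i + 2)) none)]
        else [])) []
      (by
        intro acc x _
        by_cases h : PySem.List.pyGetD cs x ' ' = '(' ∧ PySem.List.pyGetD cs (x + 1) ' ' = ')' <;>
          simp [h])]
  rw [PySem.List.foldl_append_eq_flatMap]
  rw [PySem.List.pyRange_one, List.flatMap_map, List.map_flatMap]
  simp only [List.nil_append]
  have hn : ((cs.length : Int) - 1 - 0).toNat = cs.length - 1 := by omega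
  rw [hn]
  apply List.flatMap_congr
  intro a ha
  simp only [zero_add]
  rw [show ((a : Int) + 1) = ((a + 1 : Nat) : Int) by push_cast; ring,
      show ((a : Int) + 2) = ((a + 2 : Nat) : Int) by push_cast; ring,
      PySem.List.pyGetD_natCast, PySem.List.pyGetD_natCast,
      PySem.List.slice_from_natCast,
      show ((0 : Int)) = ((0 : Nat) : Int) from rfl,
      PySem.List.slice_natCast]
  by_cases h : cs[a]?.getD ' ' = '(' ∧ cs[a + 1]?.getD ' ' = ')' <;> simp [List.getD, h]

theorem fA_eq_myA (cs : List Char) : fA cs = myA cs := by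
  induction cs using myA.induct with
  | case1 => simp [fA, myA]
  | case2 c => simp [fA, myA]
  | case3 a b rest h ih =>
    obtain ⟨rfl, rfl⟩ := h
    rw [show myA ('(' :: ')' :: rest)
        = ("()()".toList ++ rest) :: ("(())".toList ++ rest)
          :: (myA rest).map (['(', ')'] ++ ·) from by rw [myA, if_pos ⟨rfl, rfl⟩]]
    cases rest with
    | nil => simp [fA, myA]
    | cons r0 r' =>
      rw [← ih]
      unfold fA
      rw [show ('(' :: ')' :: r0 :: r').length - 1 = r'.length + 2 by simp,
          show (r0 :: r').length - 1 = r'.length by simp,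
          range_add_two, List.flatMap_cons, List.flatMap_cons, List.flatMap_map,
          List.map_flatMap]
      simp only [List.getD_cons_zero, List.getD_cons_succ]
      rw [if_pos (by simp), if_neg (by simp)]
      simp only [List.take_zero, List.drop_succ_cons, List.drop_zero, List.nil_append]
      simp only [List.cons_append, List.nil_append]
      congr 2
      apply List.flatMap_congr
      intro k hk
      by_cases h2 : (r0 :: r')[k]?.getD ' ' = '(' ∧ r'[k]?.getD ' ' = ')' <;>
        simp [List.getD, h2, List.take_succ_cons]
  | case4 a b rest h ih =>
    rw [show myA (a :: b :: rest) = (myA (b :: rest)).map (a :: ·) from by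
      rw [myA, if_neg h]]
    rw [← ih]
    unfold fA
    rw [show (a :: b :: rest).length - 1 = rest.length + 1 by simp,
        show (b :: rest).length - 1 = rest.length by simp,
        List.range_succ_eq_map, List.flatMap_cons, List.flatMap_map, List.map_flatMap]
    simp only [List.getD_cons_zero, List.getD_cons_succ]
    rw [if_neg (by simpa using h)]
    rw [List.nil_append]
    apply List.flatMap_congr
    intro k hk
    by_cases h2 : (b :: rest)[k]?.getD ' ' = '(' ∧ rest[k]?.getD ' ' = ')' <;>
      simp [List.getD, h2, List.take_succ_cons, List.drop_succ_cons]

def fB (cs : List Char) : List (List Char) :=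
  (List.range ((mySplit cs).length - 1)).flatMap (fun k =>
    [['(', ')'].intercalate ((mySplit cs).take (k + 1)) ++ "()()".toList
       ++ ['(', ')'].intercalate ((mySplit cs).drop (k + 1)),
     ['(', ')'].intercalate ((mySplit cs).take (k + 1)) ++ "(())".toList
       ++ ['(', ')'].intercalate ((mySplit cs).drop (k + 1))])

theorem B_eq_fB (old : String) :
    addOneParenthesis_alt old = (fB old.toList).map String.ofList := by
  unfold addOneParenthesis_alt fB
  dsimp only
  rw [splitOn_eq_mySplit]
  set ps := mySplit old.toList with hps
  have hlen : 1 ≤ ps.length := by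
    cases h : ps with
    | nil => exact absurd h (mySplit_ne_nil _)
    | cons x t => simp
  rw [PySem.List.pyRange_one, List.flatMap_map, List.map_flatMap]
  rw [show ((ps.length : Int) - 1).toNat = ps.length - 1 by omega]
  apply List.flatMap_congr
  intro k hk
  rw [show ((1 : Int) + (k : Nat)) = ((k + 1 : Nat) : Int) by push_cast; ring,
      PySem.List.slice_to_natCast, PySem.List.slice_from_natCast]
  simp [PySem.Chars.join]

theorem fB_eq_myA (cs : List Char) : fB cs = myA cs := by
  induction cs using mySplit.induct with
  | case1 => simp [fB, mySplit, myA]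
  | case2 c => simp [fB, mySplit, myA]
  | case3 a b rest h ih =>
    obtain ⟨rfl, rfl⟩ := h
    rw [show myA ('(' :: ')' :: rest)
        = ("()()".toList ++ rest) :: ("(())".toList ++ rest)
          :: (myA rest).map (['(', ')'] ++ ·) from by rw [myA, if_pos ⟨rfl, rfl⟩]]
    rw [← ih]
    unfold fB
    rw [show mySplit ('(' :: ')' :: rest) = [] :: mySplit rest from by
      rw [mySplit, if_pos ⟨rfl, rfl⟩]]
    cases hps : mySplit rest with
    | nil => exact absurd hps (mySplit_ne_nil _)
    | cons x t =>
      rw [show ([] :: x :: t).length - 1 = t.length + 1 by simp,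
          show (x :: t).length - 1 = t.length by simp,
          List.range_succ_eq_map, List.flatMap_cons, List.flatMap_map]
      simp only [List.take_succ_cons, List.take_zero, List.drop_succ_cons, List.drop_zero]
      rw [ic_single, show List.intercalate ['(', ')'] (x :: t) = rest from by
        rw [← hps, intercalate_mySplit]]
      simp only [List.nil_append, List.cons_append]
      congr 2
      rw [List.map_flatMap]
      apply List.flatMap_congr
      intro k hk
      rw [ic_cons_cons]
      simp [List.append_assoc]
  | case4 a b rest h ih =>
    rw [show myA (a :: b :: rest) = (myA (b :: rest)).map (a :: ·) from by
      rw [myA, if_neg h]]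
    rw [← ih]
    unfold fB
    rw [show mySplit (a :: b :: rest) = modHead (a :: ·) (mySplit (b :: rest)) from by
      rw [mySplit, if_neg h]]
    cases hps : mySplit (b :: rest) with
    | nil => exact absurd hps (mySplit_ne_nil _)
    | cons x t =>
      simp only [modHead]
      rw [show ((a :: x) :: t).length - 1 = t.length by simp,
          show (x :: t).length - 1 = t.length by simp, List.map_flatMap]
      apply List.flatMap_congr
      intro k hk
      simp only [List.take_succ_cons, List.drop_succ_cons, ic_head_cons]
      simp

theorem addOneParenthesis_eq_alt (old : String) :
    addOneParenthesis old = addOneParenthesis_alt old := by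
  rw [A_eq_fA, B_eq_fB, fA_eq_myA, fB_eq_myA]

-- ===== VERDICT (by name: the statement is the Claim_ definition above) =====
theorem addOneParenthesis_spec : Claim_equal_addOneParenthesis := by
  intro old _
  unfold Spec_addOneParenthesis
  exact addOneParenthesis_eq_alt old
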